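-- pv_equiv track=rewrite | github.com/dvdantunes/topcoder-challenges | SRM/SRM-727/div2-250-MakeTwoConsecutive.py | solve
-- ===== SOURCE A (Python) =====
-- def solve(S):
--
--     for i in range(len(S)):
--
--         # No need to remove?
--         if (i+1) < len(S) and S[i] == S[i+1]:
--             return "Possible"
--
--         # Removing 2nd element from a chunk of 3, comparing the now adjacents
--         chunk = S[i : i+3 : 2]
--         if len(chunk) == 2 and len(set(chunk)) == 1:
--             return "Possible"
--
--     return "Impossible"
-- ===== SOURCE B (Python) =====
-- def solve(S):
--     last = {}
--     for i, c in enumerate(S):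
--         if c in last and i - last[c] <= 2:
--             return "Possible"
--         last[c] = i
--     return "Impossible"
-- ===== Notes on version B (the rewrite author's own statement) =====
-- stated objective: idiomatic
-- what changed: Replaces A's per-index forward lookahead (adjacent compare plus a step-2 slice turned into a set) with a single backward-looking scan that maintains a last-seen index dict and fires when the current char's previous occurrence is within distance 2.
import Mathlib
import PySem

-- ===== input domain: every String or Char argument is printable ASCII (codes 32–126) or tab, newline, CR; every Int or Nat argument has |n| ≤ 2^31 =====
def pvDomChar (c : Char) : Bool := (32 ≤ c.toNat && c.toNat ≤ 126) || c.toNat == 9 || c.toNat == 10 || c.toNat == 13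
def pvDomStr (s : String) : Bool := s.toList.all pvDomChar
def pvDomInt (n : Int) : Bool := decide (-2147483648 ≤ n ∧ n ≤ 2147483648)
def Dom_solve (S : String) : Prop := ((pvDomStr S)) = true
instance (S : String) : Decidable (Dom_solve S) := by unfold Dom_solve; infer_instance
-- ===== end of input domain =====

-- B replaces A's forward lookahead (adjacent compare + step-2 slice via set) with a
-- last-seen-index dict scan; objective: idiomatic, same O(n) cost.

-- ===== PORT A =====
-- loop 'for i in range(len(S))' as structural recursion on the index i;
-- the step-2 slice S[i:i+3:2] is ported by hand (PySem.List.slice has no step):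
-- it is [S[i]] plus S[i+2] when i+2 < len(S).
def solveGoA (l : List Char) (i : Nat) : String :=
  if h : i < l.length then
    if i + 1 < l.length ∧ l.getD i ' ' = l.getD (i + 1) ' ' then "Possible"
    else
      let chunk : List Char :=
        l.getD i ' ' :: (if i + 2 < l.length then [l.getD (i + 2) ' '] else [])
      if chunk.length = 2 ∧ PySem.Set.len (PySem.Set.ofList chunk) = 1 then "Possible"
      else solveGoA l (i + 1)
  else "Impossible"
termination_by l.length - i
decreasing_by omega

def solve (S : String) : String := solveGoA S.toList 0

-- ===== PORT B =====
-- 'for i, c in enumerate(S): if c in last and i - last[c] <= 2: return "Possible"; last[c] = i'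
def solveGoB (l : List Char) (d : PySem.Dict Char Int) (i : Int) : String :=
  match l with
  | [] => "Impossible"
  | c :: rest =>
    match d.get? c with
    | some j => if i - j ≤ 2 then "Possible" else solveGoB rest (d.insert c i) (i + 1)
    | none => solveGoB rest (d.insert c i) (i + 1)

def solve_alt (S : String) : String := solveGoB S.toList PySem.Dict.empty 0

-- ===== PRECONDITION & SPEC =====
def Spec_solve (S : String) (out : String) : Prop := out = solve_alt S
instance (S : String) (out : String) : Decidable (Spec_solve S out) := by unfold Spec_solve; infer_instance

-- ===== CLAIM (what is proved, stated in full; the proofs are below) =====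
def Claim_equal_solve : Prop := ∀ (S : String), Dom_solve S → Spec_solve S (solve S)

-- ===== LEMMAS AND PROOFS =====

-- canonical predicate: some two equal chars at distance 1 or 2
def chkA : List Char → Bool
  | [] => false
  | [_] => false
  | a :: b :: rest =>
    (a == b) || (match rest with | c :: _ => a == c | [] => false) || chkA (b :: rest)

-- B-side predicate with the last two seen chars as context (a = two back, b = one back)
def chkB (a b : Option Char) : List Char → Bool
  | [] => false
  | c :: rest => (a == some c || b == some c) || chkB b (some c) rest

-- invariant: d maps each char to the index of its last occurrence among the first i chars;
-- a, b are the chars at positions i-2, i-1 (none if absent)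
def InvB (d : PySem.Dict Char Int) (i : Int) (a b : Option Char) : Prop :=
  ∀ c : Char,
    (b = some c → d.get? c = some (i - 1)) ∧
    (b ≠ some c → a = some c → d.get? c = some (i - 2)) ∧
    (b ≠ some c → a ≠ some c → ∀ j, d.get? c = some j → j ≤ i - 3)

theorem inv_empty : InvB PySem.Dict.empty 0 none none := by
  intro c
  refine ⟨by simp, by simp, ?_⟩
  intro _ _ j hj
  simp [PySem.Dict.get?_empty] at hj

theorem inv_step (d : PySem.Dict Char Int) (i : Int) (a b : Option Char) (c : Char)
    (h : InvB d i a b) : InvB (d.insert c i) (i + 1) b (some c) := by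
  intro c'
  by_cases hc : c' = c
  · subst hc
    refine ⟨fun _ => ?_, fun hb => (hb rfl).elim, fun hb => (hb rfl).elim⟩
    rw [PySem.Dict.get?_insert_self]
    congr 1
    omega
  · have hget : (d.insert c i).get? c' = d.get? c' :=
      PySem.Dict.get?_insert_of_ne d i hc
    obtain ⟨h1, h2, h3⟩ := h c'
    refine ⟨?_, ?_, ?_⟩
    · intro hb
      exact absurd (Option.some.inj hb) (fun e => hc e.symm)
    · intro _ ha
      rw [hget, h1 ha]
      congr 1
      omega
    · intro _ hbne j hj
      rw [hget] at hj
      have hb : b ≠ some c' := hbne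
      by_cases ha : a = some c'
      · have := h2 hb ha
        rw [this] at hj
        have : j = i - 2 := (Option.some.inj hj).symm
        omega
      · have := h3 hb ha j hj
        omega

theorem solveGoB_eq (l : List Char) : ∀ (d : PySem.Dict Char Int) (i : Int)
    (a b : Option Char), InvB d i a b →
    solveGoB l d i = if chkB a b l then "Possible" else "Impossible" := by
  induction l with
  | nil => intro d i a b _; simp [solveGoB, chkB]
  | cons c rest ih =>
    intro d i a b hInv
    obtain ⟨h1, h2, h3⟩ := hInv c
    have hstep := inv_step d i a b c hInv
    by_cases hb : b = some c
    · have hget := h1 hb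
      simp [solveGoB, hget, chkB, hb]
    · by_cases ha : a = some c
      · have hget := h2 hb ha
        simp [solveGoB, hget, chkB, ha]
      · have hhead : (a == some c || b == some c) = false := by
          simp [ha, hb]
        cases hget : d.get? c with
        | none =>
          simp only [solveGoB, hget, chkB, hhead, Bool.false_or]
          exact ih _ _ _ _ hstep
        | some j =>
          have hj := h3 hb ha j hget
          simp only [solveGoB, hget, chkB, hhead, Bool.false_or]
          rw [if_neg (by omega)]
          exact ih _ _ _ _ hstep

-- chkB with context equals chkA plus the pairs that reach back into the context
theorem chkB_eq_chkA_or (l : List Char) : ∀ (a b : Option Char),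
    chkB a b l = (chkA l ||
      (match l with
       | [] => false
       | x :: t => (a == some x || b == some x) ||
           (match t with | y :: _ => b == some y | [] => false))) := by
  induction l with
  | nil => intro a b; simp [chkB, chkA]
  | cons x t ih =>
    intro a b
    cases t with
    | nil => simp [chkB, chkA]
    | cons y u =>
      have hih := ih b (some x)
      simp only [chkB] at hih ⊢
      rw [hih]
      cases u with
      | nil =>
        simp only [chkA]
        rw [Bool.eq_iff_iff]
        simp only [Bool.or_eq_true, beq_iff_eq, Option.some.injEq]
        tauto
      | cons z v =>
        simp only [chkA]
        rw [Bool.eq_iff_iff]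
        simp only [Bool.or_eq_true, beq_iff_eq, Option.some.injEq]
        tauto

theorem chkB_none_none (l : List Char) : chkB none none l = chkA l := by
  rw [chkB_eq_chkA_or l none none]
  cases l with
  | nil => simp
  | cons x t => cases t <;> simp

theorem solveGoA_eq (l : List Char) (i : Nat) :
    solveGoA l i = if chkA (l.drop i) then "Possible" else "Impossible" := by
  fun_induction solveGoA l i with
  | case1 i h hc1 =>
    obtain ⟨h1, heq⟩ := hc1
    rw [List.drop_eq_getElem_cons h, List.drop_eq_getElem_cons h1]
    have e1 : l.getD i ' ' = l[i] := List.getD_eq_getElem l ' ' h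
    have e2 : l.getD (i+1) ' ' = l[i+1] := List.getD_eq_getElem l ' ' h1
    rw [e1, e2] at heq
    simp [chkA, heq]
  | case2 i h hc1 chunk hc2 =>
    -- chunk has length 2 and its set has one element → i+2 < len ∧ l[i] = l[i+2]
    replace hc2 : (l.getD i ' ' :: (if _ : i + 2 < l.length then [l.getD (i + 2) ' '] else [])).length = 2 ∧ PySem.Set.len (PySem.Set.ofList (l.getD i ' ' :: (if _ : i + 2 < l.length then [l.getD (i + 2) ' '] else []))) = 1 := hc2
    by_cases h2 : i + 2 < l.length
    · have h1 : i + 1 < l.length := by omega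
      rw [dif_pos h2] at hc2
      have e0 : l.getD i ' ' = l[i] := List.getD_eq_getElem l ' ' h
      have e2 : l.getD (i+2) ' ' = l[i+2] := List.getD_eq_getElem l ' ' h2
      rw [e0, e2] at hc2
      have heq : l[i] = l[i+2] := by
        by_contra hne
        have hne' : l[i+2] ≠ l[i] := fun e => hne e.symm
        have : PySem.Set.len (PySem.Set.ofList [l[i], l[i+2]]) = 2 := by
          simp [PySem.Set.ofList, PySem.Set.add, PySem.Set.len, PySem.Set.contains, hne']
        omega
      rw [List.drop_eq_getElem_cons h, List.drop_eq_getElem_cons h1,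
          List.drop_eq_getElem_cons h2]
      simp [chkA, heq]
    · rw [dif_neg h2] at hc2
      simp at hc2
  | case3 i h hc1 chunk hc2 ih =>
    rw [ih, List.drop_eq_getElem_cons h]
    have e0 : l.getD i ' ' = l[i] := List.getD_eq_getElem l ' ' h
    by_cases h1 : i + 1 < l.length
    · have l1 : l.drop (i+1) = l[i+1] :: l.drop (i+2) := List.drop_eq_getElem_cons h1
      have hne1 : l[i] ≠ l[i+1] := by
        intro e
        exact hc1 ⟨h1, by rw [e0, List.getD_eq_getElem l ' ' h1, e]⟩
      by_cases h2 : i + 2 < l.length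
      · have l2 : l.drop (i+2) = l[i+2] :: l.drop (i+3) := List.drop_eq_getElem_cons h2
        replace hc2 : ¬((l.getD i ' ' :: (if _ : i + 2 < l.length then [l.getD (i + 2) ' '] else [])).length = 2 ∧ PySem.Set.len (PySem.Set.ofList (l.getD i ' ' :: (if _ : i + 2 < l.length then [l.getD (i + 2) ' '] else []))) = 1) := hc2
        rw [dif_pos h2] at hc2
        have hne2 : l[i] ≠ l[i+2] := by
          intro e
          apply hc2
          constructor
          · simp
          · rw [e0, List.getD_eq_getElem l ' ' h2, e]
            simp [PySem.Set.ofList, PySem.Set.add, PySem.Set.len, PySem.Set.contains]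
        simp only [l1, l2, chkA]
        simp [hne1, hne2]
      · have hd : l.drop (i+2) = [] := List.drop_eq_nil_of_le (by omega)
        rw [l1, hd]
        simp [chkA, hne1]
    · have hd : l.drop (i+1) = [] := List.drop_eq_nil_of_le (by omega)
      rw [hd]
      simp [chkA]
  | case4 i h =>
    have hd : l.drop i = [] := List.drop_eq_nil_of_le (by omega)
    rw [hd]
    simp [chkA]

-- ===== VERDICT (by name: the statement is the Claim_ definition above) =====
theorem solve_spec : Claim_equal_solve := by
  intro S _
  unfold Spec_solve solve solve_alt
  rw [solveGoA_eq S.toList 0, solveGoB_eq S.toList PySem.Dict.empty 0 none none inv_empty,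
      chkB_none_none]
  simp
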